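-- pv_equiv track=rewrite | github.com/tggithub619/Codewars_Python | Sum of factorials with letters.py | factorial_sum
-- ===== SOURCE A (Python) =====
-- import math
--
-- def factorial_sum(string):
--     s = ""
--     for el in string:
--         if el.isdigit():
--             s += el
--         else:
--             s += " "
--     return sum([math.factorial(int(el)) for el in s.split()])
-- ===== SOURCE B (Python) =====
-- import math
--
-- def factorial_sum(string):
--     # Single pass with a digit buffer: no intermediate replaced string, no split().
--     total = 0
--     buf = ""
--     for ch in string:
--         if ch.isdigit():
--             buf += ch
--         else:
--             if buf:
--                 total += math.factorial(int(buf))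
--                 buf = ""
--     if buf:
--         total += math.factorial(int(buf))
--     return total
-- ===== Notes on version B (the rewrite author's own statement) =====
-- stated objective: simpler
-- what changed: Replaces A's build-a-spaced-copy-then-split()-then-map pipeline by a single pass over the characters with a running digit buffer that is flushed (factorial added) at each non-digit and once at the end, so no intermediate string, no token list and no second scan are built.
import Mathlib
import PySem

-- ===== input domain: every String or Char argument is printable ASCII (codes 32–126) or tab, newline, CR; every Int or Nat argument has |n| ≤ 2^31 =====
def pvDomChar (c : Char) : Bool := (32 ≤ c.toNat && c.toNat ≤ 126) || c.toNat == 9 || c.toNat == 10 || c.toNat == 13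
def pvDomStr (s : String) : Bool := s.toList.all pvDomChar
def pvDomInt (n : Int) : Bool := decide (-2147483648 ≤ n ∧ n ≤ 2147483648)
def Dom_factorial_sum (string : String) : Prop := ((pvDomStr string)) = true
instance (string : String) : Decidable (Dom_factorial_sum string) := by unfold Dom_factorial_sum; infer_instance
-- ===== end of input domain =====

-- B changes the decomposition only (one pass with a digit buffer instead of replace/split/map); same O(n) cost.

-- math.factorial(int(t)) for a token t; int() is PySem.Int.ofChars? (.getD 0 is unreachable: tokens are nonempty digit runs)
def pvFact (t : List Char) : Int := (Nat.factorial ((PySem.Int.ofChars? t).getD 0).toNat : Int)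

-- ===== PORT A =====
def factorial_sum (string : String) : Int :=
  -- s = "" ; for el in string: s += el if el.isdigit() else " "
  let s : List Char := string.toList.foldl
    (fun acc el => if PySem.Chars.isdigit el then acc ++ [el] else acc ++ [' ']) []
  -- sum([math.factorial(int(el)) for el in s.split()])
  ((PySem.Chars.split₀ s).map pvFact).sum

-- ===== PORT B =====
-- state = (total, buf)
def fsStep (st : Int × List Char) (c : Char) : Int × List Char :=
  if PySem.Chars.isdigit c then (st.1, st.2 ++ [c])
  else if st.2.isEmpty then st else (st.1 + pvFact st.2, [])

def factorial_sum_alt (string : String) : Int :=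
  let st := string.toList.foldl fsStep (0, [])
  if st.2.isEmpty then st.1 else st.1 + pvFact st.2

-- ===== PRECONDITION & SPEC =====
def Spec_factorial_sum (string : String) (out : Int) : Prop := out = factorial_sum_alt string
instance (string : String) (out : Int) : Decidable (Spec_factorial_sum string out) := by unfold Spec_factorial_sum; infer_instance

-- ===== CLAIM (what is proved, stated in full; the proofs are below) =====
def Claim_equal_factorial_sum : Prop := ∀ (string : String), Dom_factorial_sum string → Spec_factorial_sum string (factorial_sum string)

-- ===== LEMMAS AND PROOFS =====

lemma isspace_of_isdigit (c : Char) (h : PySem.Chars.isdigit c = true) :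
    PySem.Chars.isspace c = false := by
  simp [PySem.Chars.isdigit] at h
  have h1 : 48 ≤ c.toNat := h.1
  have h2 : c.toNat ≤ 57 := h.2
  simp [PySem.Chars.isspace]
  omega

lemma isspace_space : PySem.Chars.isspace ' ' = true := by decide

-- flush of B's final state
def pvFlush (st : Int × List Char) : Int := if st.2.isEmpty then st.1 else st.1 + pvFact st.2

def pvRepl (c : Char) : Char := if PySem.Chars.isdigit c then c else ' '

-- the loop invariant: A's split₀.go state (cur reversed token, acc reversed token list)
-- corresponds to B's fold state (total, cur.reverse)
lemma main_inv (l : List Char) : ∀ (cur : List Char) (acc : List (List Char)) (total : Int),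
    total + ((PySem.Chars.split₀.go (l.map pvRepl) cur acc).map pvFact).sum
      = pvFlush (l.foldl fsStep (total, cur.reverse)) + ((acc.map pvFact).sum) := by
  induction l with
  | nil =>
    intro cur acc total
    by_cases hc : cur = []
    · subst hc
      simp [PySem.Chars.split₀.go, pvFlush]
    · simp [PySem.Chars.split₀.go, List.isEmpty_iff, hc, pvFlush]
      ring
  | cons c rest ih =>
    intro cur acc total
    by_cases hd : PySem.Chars.isdigit c = true
    · have hs := isspace_of_isdigit c hd
      simp only [List.map_cons, pvRepl, hd, if_pos, List.foldl_cons]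
      rw [PySem.Chars.split₀.go]
      simp only [hs, Bool.false_eq_true, if_false]
      have : fsStep (total, cur.reverse) c = (total, (c :: cur).reverse) := by
        simp [fsStep, hd]
      rw [this]
      exact ih (c :: cur) acc total
    · have hd' : PySem.Chars.isdigit c = false := by simpa using hd
      simp only [List.map_cons, pvRepl, hd', Bool.false_eq_true, if_false, List.foldl_cons]
      rw [PySem.Chars.split₀.go]
      simp only [isspace_space, if_pos]
      by_cases hc : cur = []
      · subst hc
        simp only [List.isEmpty_nil, if_pos]
        have : fsStep (total, ([] : List Char).reverse) c = (total, ([] : List Char).reverse) := by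
          simp [fsStep, hd']
        rw [this]
        exact ih [] acc total
      · simp only [List.isEmpty_iff, hc, if_false]
        have hstep : fsStep (total, cur.reverse) c = (total + pvFact cur.reverse, ([] : List Char).reverse) := by
          simp [fsStep, hd', List.isEmpty_iff, hc]
        rw [hstep]
        have := ih [] (cur.reverse :: acc) (total + pvFact cur.reverse)
        simp only [List.map_cons, List.sum_cons, List.reverse_nil] at this ⊢
        omega
  
lemma repl_map (l : List Char) :
    l.foldl (fun acc el => if PySem.Chars.isdigit el then acc ++ [el] else acc ++ [' ']) [] = l.map pvRepl := by
  have : ∀ el acc, (if PySem.Chars.isdigit el then acc ++ [el] else acc ++ [' ']) = acc ++ [pvRepl el] := by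
    intro el acc; unfold pvRepl; split_ifs <;> rfl
  simp only [this]
  simpa using PySem.List.foldl_append_singleton_eq_map pvRepl l []

-- ===== VERDICT (by name: the statement is the Claim_ definition above) =====
theorem factorial_sum_spec : Claim_equal_factorial_sum := by
  intro string _
  unfold Spec_factorial_sum factorial_sum factorial_sum_alt
  rw [repl_map]
  have h := main_inv string.toList [] [] 0
  simpa [PySem.Chars.split₀, pvFlush] using h
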